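-- pv_equiv track=rewrite | github.com/pay-me-for-the-lab/AOIS-2023-1sem | LAB3/main.py | generate_binary_combinations
-- ===== SOURCE A (Python) =====
-- def initialize_string(val):
--     return [{i: 0 for i in val}]
--
-- def get_index_to_update(j, string_in_table):
--     index = list(string_in_table.keys())[j]
--     string_in_table[index] = 0
--     return index, string_in_table
--
-- def update_string(string, string_in_table):
--     if string_in_table not in string:
--         string.append(string_in_table)
--         return True
--     return False
--
-- def generate_binary_combinations(args, val):
--     answer = initialize_string(val)
--     for i in range(1, 2 ** args):
--         for j in range(args - 1, -1, -1):
--             string_in_table = answer[i - 1].copy()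
--             index, string_in_table = get_index_to_update(j, string_in_table)
--             if update_string(answer, string_in_table):
--                 break
--             string_in_table[index] = 1
--             if update_string(answer, string_in_table):
--                 break
--     return answer
-- ===== SOURCE B (Python) =====
-- def generate_binary_combinations(args, val):
--     keys = list(dict.fromkeys(val))
--     rows = []
--     for i in range(2 ** args):
--         g = i ^ (i >> 1)
--         row = {k: 0 for k in keys}
--         for j in range(args):
--             row[keys[j]] = (g >> (args - 1 - j)) & 1
--         rows.append(row)
--     return rows
-- ===== Notes on version B (the rewrite author's own statement) =====
-- stated objective: alternative
-- what changed: Instead of greedily searching, for each new row, which bit flip yields a dict not yet present in the growing answer list (a linear scan over all previous rows per attempt), B emits row i directly from the closed-form Gray code i^(i>>1), mapping bit a-1-j to the j-th distinct key.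
import Mathlib
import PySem

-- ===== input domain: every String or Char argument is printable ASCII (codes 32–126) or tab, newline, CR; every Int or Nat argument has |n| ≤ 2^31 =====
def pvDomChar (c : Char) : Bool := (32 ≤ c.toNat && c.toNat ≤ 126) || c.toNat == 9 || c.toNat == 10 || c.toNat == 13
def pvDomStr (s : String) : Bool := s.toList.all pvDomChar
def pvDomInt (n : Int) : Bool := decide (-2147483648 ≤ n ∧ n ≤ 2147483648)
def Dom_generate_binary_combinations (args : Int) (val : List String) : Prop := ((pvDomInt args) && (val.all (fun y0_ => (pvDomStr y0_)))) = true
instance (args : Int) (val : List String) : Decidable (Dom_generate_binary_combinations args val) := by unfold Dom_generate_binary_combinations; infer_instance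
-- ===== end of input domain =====

-- B replaces A's greedy search (scan of all previous rows per candidate bit flip) by the closed-form Gray code i^(i>>1): a different algorithm, same exact output.
-- Python A's `string_in_table not in string` compares dicts with ==; all dicts A builds share one key order, so structural equality is exact there.


-- ===== PORT A =====
def initialize_string (val : List String) : List (PySem.Dict String Int) :=
  [val.foldl (fun d i => d.insert i 0) PySem.Dict.empty]

-- `list(string_in_table.keys())[j]`: none = IndexError (excluded by Pre_)
def get_index_to_update (j : Int) (string_in_table : PySem.Dict String Int) :
    Option (String × PySem.Dict String Int) :=
  match PySem.List.pyGet? string_in_table.keys j with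
  | none => none
  | some index => some (index, string_in_table.insert index 0)

def update_string (string : List (PySem.Dict String Int)) (string_in_table : PySem.Dict String Int) :
    List (PySem.Dict String Int) × Bool :=
  if string.contains string_in_table then (string, false) else (string ++ [string_in_table], true)

-- inner `for j in range(args-1,-1,-1)` with its two breaks; `answer[i-1]` none = IndexError (excluded by Pre_)
def pvInnerA (i : Int) (js : List Int) (answer : List (PySem.Dict String Int)) :
    List (PySem.Dict String Int) :=
  match js with
  | [] => answer
  | j :: rest =>
    match PySem.List.pyGet? answer (i - 1) with
    | none => answer
    | some prev =>
      match get_index_to_update j prev with   -- operates on `answer[i-1].copy()`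
      | none => answer
      | some (index, sit) =>
        let r1 := update_string answer sit
        if r1.2 then r1.1
        else
          let sit1 := sit.insert index 1
          let r2 := update_string r1.1 sit1
          if r2.2 then r2.1 else pvInnerA i rest r2.1

def generate_binary_combinations (args : Int) (val : List String) : List (List (String × Int)) :=
  let answer := initialize_string val
  -- `2 ** args`: for args < 0 Python raises TypeError (range of a float); excluded by Pre_
  let n : Int := if 0 ≤ args then ((2 ^ args.toNat : Nat) : Int) else 0
  ((PySem.List.pyRange 1 n 1).foldl
      (fun ans i => pvInnerA i (PySem.List.pyRange (args - 1) (-1) (-1)) ans) answer).map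
    PySem.Dict.items

-- ===== PORT B =====
def generate_binary_combinations_alt (args : Int) (val : List String) : List (List (String × Int)) :=
  let keys := PySem.List.dedup val    -- list(dict.fromkeys(val))
  let n : Int := if 0 ≤ args then ((2 ^ args.toNat : Nat) : Int) else 0   -- 2 ** args (args < 0: TypeError, excluded)
  (PySem.List.pyRange 0 n 1).map (fun i =>
    let g : Int := PySem.Int.bxor i (i >>> 1)
    let row0 : PySem.Dict String Int := keys.foldl (fun d k => d.insert k 0) PySem.Dict.empty
    let row := (PySem.List.pyRange 0 args 1).foldl (fun r j =>
      match PySem.List.pyGet? keys j with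
      | none => r      -- keys[j]: IndexError (outside Pre_)
      | some key => r.insert key (PySem.Int.band (g >>> ((args - 1 - j).toNat)) 1)) row0
    row.items)

-- ===== PRECONDITION & SPEC =====
-- Pre_ excludes exactly the inputs where A raises: args < 0 (TypeError on range(1, 2**args))
-- and args greater than the number of distinct keys (IndexError indexing the key list).
def Pre_generate_binary_combinations (args : Int) (val : List String) : Prop :=
  0 ≤ args ∧ args ≤ (PySem.List.dedup val).length

instance (args : Int) (val : List String) : Decidable (Pre_generate_binary_combinations args val) := by
  unfold Pre_generate_binary_combinations; infer_instance

def pvWitness_generate_binary_combinations : Int × List String := (2, ["a", "b", "a"])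

def Spec_generate_binary_combinations (args : Int) (val : List String) (out : List (List (String × Int))) : Prop := out = generate_binary_combinations_alt args val
instance (args : Int) (val : List String) (out : List (List (String × Int))) : Decidable (Spec_generate_binary_combinations args val out) := by unfold Spec_generate_binary_combinations; infer_instance

-- ===== CLAIM (what is proved, stated in full; the proofs are below) =====
def Claim_equal_generate_binary_combinations : Prop := ∀ (args : Int) (val : List String), Dom_generate_binary_combinations args val → Pre_generate_binary_combinations args val → Spec_generate_binary_combinations args val (generate_binary_combinations args val)

-- ===== LEMMAS AND PROOFS =====

-- ---- proof-side abbreviations: Gray code, bit extraction, the canonical row ----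

def pvGray (m : Nat) : Nat := m ^^^ (m >>> 1)

def pvBit (g p : Nat) : Nat := (g >>> p) &&& 1

def pvBitF (a g : Nat) : Int → Int :=
  fun j => if j < (a : Int) then ((pvBit g (a - 1 - j.toNat) : Nat) : Int) else 0

def pvRow (keys : List String) (f : Int → Int) : List (String × Int) :=
  (PySem.List.enumerate keys 0).map (fun jk => (jk.2, f jk.1))

def pvRowD (a : Nat) (keys : List String) (m : Nat) : PySem.Dict String Int :=
  PySem.Dict.mk (pvRow keys (pvBitF a (pvGray m)))

def pvRows (a : Nat) (keys : List String) (n : Nat) : List (PySem.Dict String Int) :=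
  (List.range n).map (pvRowD a keys)

-- least zero-bit position (= number of trailing ones)
def pvLowZero (i : Nat) : Nat :=
  if i % 2 = 1 then pvLowZero (i / 2) + 1 else 0
  decreasing_by omega

-- ---- bit arithmetic ----

lemma pvBit_le_one (g p : Nat) : pvBit g p ≤ 1 := by
  simp only [pvBit, Nat.and_one_is_mod]; omega

lemma pvBit_eq_toNat_testBit (g p : Nat) : pvBit g p = (g.testBit p).toNat := by
  simp only [pvBit, Nat.testBit, Nat.and_one_is_mod]
  rcases Nat.mod_two_eq_zero_or_one (g >>> p) with h | h <;> simp [h]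

lemma pvBit_xor_pow_self (g p : Nat) : pvBit (g ^^^ 2 ^ p) p = 1 - pvBit g p := by
  rw [pvBit_eq_toNat_testBit, pvBit_eq_toNat_testBit, Nat.testBit_xor,
    Nat.testBit_two_pow_self]
  cases g.testBit p <;> rfl

lemma pvBit_xor_pow_ne (g p q : Nat) (h : q ≠ p) : pvBit (g ^^^ 2 ^ p) q = pvBit g q := by
  rw [pvBit_eq_toNat_testBit, pvBit_eq_toNat_testBit, Nat.testBit_xor,
    Nat.testBit_two_pow_of_ne (Ne.symm h)]
  cases g.testBit q <;> rfl

lemma pvTestBit_high {g n q : Nat} (hg : g < 2 ^ n) (hq : n ≤ q) : g.testBit q = false := by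
  apply Nat.testBit_eq_false_of_lt
  exact lt_of_lt_of_le hg (Nat.pow_le_pow_right (by norm_num) hq)

lemma pvGray_lt {m n : Nat} (h : m < 2 ^ n) : pvGray m < 2 ^ n := by
  exact Nat.xor_lt_two_pow h (lt_of_le_of_lt (Nat.shiftRight_le m 1) h)

lemma pvGray_inj {x y : Nat} (h : pvGray x = pvGray y) : x = y := by
  induction x using Nat.strong_induction_on generalizing y with
  | _ x ih =>
    rcases Nat.eq_zero_or_pos x with rfl | hx
    · have h0 : y ^^^ y >>> 1 = 0 := by simpa [pvGray] using h.symm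
      have := Nat.eq_of_xor_eq_zero h0
      rw [Nat.shiftRight_one] at this; omega
    · have hsh : pvGray (x >>> 1) = pvGray (y >>> 1) := by
        simp only [pvGray] at h ⊢
        have := congrArg (· >>> 1) h
        simpa [Nat.shiftRight_xor_distrib] using this
      have hx2 : x >>> 1 = y >>> 1 := ih (x >>> 1) (by rw [Nat.shiftRight_one]; omega) hsh
      have hb : pvBit (pvGray x) 0 = pvBit (pvGray y) 0 := by rw [h]
      simp only [pvGray, pvBit, Nat.shiftRight_zero, Nat.and_one_is_mod] at hb
      rw [Nat.shiftRight_one] at hx2 hb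
      rcases Nat.mod_two_eq_zero_or_one x with h1 | h1 <;>
        rcases Nat.mod_two_eq_zero_or_one y with h2 | h2 <;> simp [hx2] at hb ⊢ <;> omega

lemma pvGray_xor (x y : Nat) : pvGray (x ^^^ y) = pvGray x ^^^ pvGray y := by
  simp only [pvGray, Nat.shiftRight_xor_distrib]
  apply Nat.eq_of_testBit_eq
  intro i
  simp only [Nat.testBit_xor]
  cases x.testBit i <;> cases (x >>> 1).testBit i <;> cases y.testBit i <;>
    cases (y >>> 1).testBit i <;> rfl

lemma pvTestBit_pow (p q : Nat) : (2 ^ p : Nat).testBit q = decide (q = p) := by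
  rcases eq_or_ne q p with rfl | h
  · simp [Nat.testBit_two_pow_self]
  · simp [h, Nat.testBit_two_pow_of_ne (Ne.symm h)]

lemma pvGray_mask (p : Nat) : pvGray (2 ^ (p + 1) - 1) = 2 ^ p := by
  apply Nat.eq_of_testBit_eq
  intro i
  simp only [pvGray, Nat.testBit_xor, Nat.testBit_shiftRight, Nat.testBit_two_pow_sub_one,
    pvTestBit_pow]
  by_cases h1 : i < p + 1 <;> by_cases h2 : 1 + i < p + 1 <;> simp [h1, h2] <;> omega

lemma pvXor_disjoint (n a b : Nat) (hb : b < 2 ^ n) : (2 ^ n * a) ^^^ b = 2 ^ n * a + b := by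
  apply Nat.eq_of_testBit_eq
  intro j
  rw [Nat.testBit_two_pow_mul_add a hb j, Nat.testBit_xor, Nat.testBit_two_pow_mul]
  by_cases hj : j < n
  · simp [hj, (show ¬ j ≥ n by omega)]
  · simp [hj, (show j ≥ n by omega), pvTestBit_high hb (show n ≤ j by omega)]

lemma pvXor_block (n a b c : Nat) (hb : b < 2 ^ n) (hc : c < 2 ^ n) :
    (2 ^ n * a + b) ^^^ c = 2 ^ n * a + (b ^^^ c) := by
  rw [← pvXor_disjoint n a b hb, Nat.xor_assoc, pvXor_disjoint n a (b ^^^ c)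
    (Nat.xor_lt_two_pow hb hc)]

lemma pvMask_xor {p t : Nat} (h : p < t) :
    (2 ^ t - 1) ^^^ (2 ^ (p + 1) - 1) = 2 ^ t - 2 ^ (p + 1) := by
  have hrw : 2 ^ t - 2 ^ (p + 1) = 2 ^ (p + 1) * (2 ^ (t - p - 1) - 1) := by
    rw [Nat.mul_sub, Nat.mul_one, ← Nat.pow_add, show p + 1 + (t - p - 1) = t from by omega]
  rw [hrw]
  apply Nat.eq_of_testBit_eq
  intro j
  rw [Nat.testBit_xor, Nat.testBit_two_pow_mul]
  simp only [Nat.testBit_two_pow_sub_one]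
  by_cases h1 : j < p + 1
  · simp [(show j < t by omega), h1, (show ¬ j ≥ p + 1 by omega)]
  · by_cases h2 : j < t <;>
      simp [h1, h2, (show j ≥ p + 1 by omega), show j - (p + 1) < t - p - 1 ↔ j < t by omega]

lemma pvMask_top (t : Nat) : (2 ^ t - 1) ^^^ (2 ^ (t + 1) - 1) = 2 ^ t := by
  apply Nat.eq_of_testBit_eq
  intro j
  rw [Nat.testBit_xor]
  simp only [Nat.testBit_two_pow_sub_one, pvTestBit_pow]
  by_cases h1 : j < t <;> by_cases h2 : j < t + 1 <;> simp [h1, h2] <;> omega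

lemma pvLowZero_decomp (i : Nat) :
    ∃ q, i = 2 ^ (pvLowZero i + 1) * q + (2 ^ pvLowZero i - 1) := by
  induction i using Nat.strong_induction_on with
  | _ i ih =>
    by_cases h : i % 2 = 1
    · obtain ⟨q, hq⟩ := ih (i / 2) (by omega)
      refine ⟨q, ?_⟩
      rw [pvLowZero, if_pos h]
      have h1 : (0:Nat) < 2 ^ pvLowZero (i / 2) := Nat.two_pow_pos _
      rw [Nat.pow_succ, Nat.pow_succ]
      rw [Nat.pow_succ] at hq
      have hb : 2 ^ pvLowZero (i / 2) * 2 * 2 * q = 2 * (2 ^ pvLowZero (i / 2) * 2 * q) := by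
        ring
      omega
    · refine ⟨i / 2, ?_⟩
      rw [pvLowZero, if_neg h]
      norm_num
      omega

lemma pvXor_low {i t q p : Nat} (hdec : i = 2 ^ (t + 1) * q + (2 ^ t - 1)) (hp : p < t) :
    i ^^^ (2 ^ (p + 1) - 1) = 2 ^ (t + 1) * q + (2 ^ t - 2 ^ (p + 1)) := by
  have h1 : 2 ^ t - 1 < 2 ^ (t + 1) := by
    have := Nat.two_pow_pos t; rw [Nat.pow_succ]; omega
  have h2 : 2 ^ (p + 1) - 1 < 2 ^ (t + 1) := by
    have := Nat.pow_le_pow_right (show 1 ≤ 2 by norm_num) (show p + 1 ≤ t + 1 by omega)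
    have := Nat.two_pow_pos (p+1); omega
  rw [hdec, pvXor_block _ _ _ _ h1 h2, pvMask_xor hp]

lemma pvXor_top {i t q : Nat} (hdec : i = 2 ^ (t + 1) * q + (2 ^ t - 1)) :
    i ^^^ (2 ^ (t + 1) - 1) = i + 1 := by
  have h1 : 2 ^ t - 1 < 2 ^ (t + 1) := by
    have := Nat.two_pow_pos t; rw [Nat.pow_succ]; omega
  have h2 : 2 ^ (t + 1) - 1 < 2 ^ (t + 1) := by
    have := Nat.two_pow_pos (t+1); omega
  rw [hdec, pvXor_block _ _ _ _ h1 h2, pvMask_top]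
  have h3 := Nat.two_pow_pos t
  omega

lemma pvGray_flip (m p : Nat) : pvGray m ^^^ 2 ^ p = pvGray (m ^^^ (2 ^ (p + 1) - 1)) := by
  rw [pvGray_xor, pvGray_mask]

-- ---- rows ----

lemma pvRow_length (keys : List String) (f : Int → Int) :
    (pvRow keys f).length = keys.length := by
  simp [pvRow, PySem.List.length_enumerate]

lemma pvRow_getElem (keys : List String) (f : Int → Int) (k : Nat) (hk : k < keys.length) :
    (pvRow keys f)[k]'(by rw [pvRow_length]; exact hk) = (keys[k], f (k : Int)) := by
  simp [pvRow, PySem.List.getElem_enumerate]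

lemma pvRow_fst (keys : List String) (f : Int → Int) :
    (pvRow keys f).map Prod.fst = keys := by
  rw [pvRow, List.map_map]
  exact PySem.List.map_snd_enumerate keys 0

lemma pvRow_keys (keys : List String) (f : Int → Int) :
    (PySem.Dict.mk (pvRow keys f)).keys = keys := by
  show (pvRow keys f).map Prod.fst = keys
  exact pvRow_fst keys f

lemma pvRow_eq_iff (keys : List String) (f g : Int → Int) :
    pvRow keys f = pvRow keys g ↔ ∀ k : Nat, k < keys.length → f (k : Int) = g (k : Int) := by
  constructor
  · intro h k hk
    have h1 := List.getElem_of_eq h (show k < (pvRow keys f).length by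
      rw [pvRow_length]; exact hk)
    rw [pvRow_getElem keys f k hk, pvRow_getElem keys g k hk] at h1
    exact congrArg Prod.snd h1
  · intro h
    apply List.ext_getElem (by rw [pvRow_length, pvRow_length])
    intro k h1 h2
    have hk : k < keys.length := by rwa [pvRow_length] at h1
    rw [pvRow_getElem keys f k hk, pvRow_getElem keys g k hk, h k hk]

lemma pvRow_insert (keys : List String) (hnd : keys.Nodup) (f : Int → Int) (j : Nat)
    (hj : j < keys.length) (v : Int) :
    (PySem.Dict.mk (pvRow keys f)).insert keys[j] v
      = PySem.Dict.mk (pvRow keys (fun j' => if j' = (j : Int) then v else f j')) := by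
  apply PySem.Dict.ext
  have hc : (PySem.Dict.mk (pvRow keys f)).contains keys[j] = true := by
    rw [PySem.Dict.contains_iff_mem_keys, pvRow_keys]
    exact List.getElem_mem hj
  rw [PySem.Dict.items_insert_of_contains _ _ hc]
  rw [show (PySem.Dict.mk (pvRow keys f)).items = pvRow keys f from rfl,
    show (PySem.Dict.mk (pvRow keys (fun j' => if j' = (j : Int) then v else f j'))).items
      = pvRow keys (fun j' => if j' = (j : Int) then v else f j') from rfl]
  apply List.ext_getElem (by rw [List.length_map, pvRow_length, pvRow_length])
  intro k h1 h2
  have hk : k < keys.length := by rwa [List.length_map, pvRow_length] at h1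
  rw [List.getElem_map]
  rw [pvRow_getElem keys f k hk, pvRow_getElem keys _ k hk]
  by_cases hkj : k = j
  · subst hkj
    simp
  · have hne : keys[k] ≠ keys[j] := by
      intro h
      exact hkj ((List.Nodup.getElem_inj_iff hnd).1 h)
    have : ((k : Int) = (j : Int)) = False := by simp [hkj]
    simp [hne, this]

lemma pvBitF_eval (a g k : Nat) (hk : k < a) :
    pvBitF a g (k : Int) = ((pvBit g (a - 1 - k) : Nat) : Int) := by
  simp [pvBitF, show ((k:Int) < (a:Int)) from by exact_mod_cast hk]

lemma pvBitF_eval_ge (a g k : Nat) (hk : a ≤ k) : pvBitF a g (k : Int) = 0 := by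
  simp [pvBitF, show ¬ ((k:Int) < (a:Int)) from by exact_mod_cast not_lt.2 hk]

lemma pvRow_gray_inj (a : Nat) (keys : List String) (hlen : a ≤ keys.length)
    (g g' : Nat) (hg : g < 2 ^ a) (hg' : g' < 2 ^ a) :
    pvRow keys (pvBitF a g) = pvRow keys (pvBitF a g') ↔ g = g' := by
  constructor
  · intro h
    rw [pvRow_eq_iff] at h
    apply Nat.eq_of_testBit_eq
    intro q
    by_cases hq : q < a
    · have hk : a - 1 - q < keys.length := by omega
      have := h (a - 1 - q) hk
      rw [pvBitF_eval a g _ (by omega), pvBitF_eval a g' _ (by omega)] at this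
      have heq : pvBit g (a - 1 - (a - 1 - q)) = pvBit g' (a - 1 - (a - 1 - q)) := by
        exact_mod_cast this
      rw [show a - 1 - (a - 1 - q) = q by omega] at heq
      rw [pvBit_eq_toNat_testBit, pvBit_eq_toNat_testBit] at heq
      cases hb : g.testBit q <;> cases hb' : g'.testBit q <;> simp [hb, hb'] at heq ⊢
    · rw [pvTestBit_high hg (by omega), pvTestBit_high hg' (by omega)]
  · intro h; rw [h]

lemma pvRow_update_self (keys : List String) (a g p : Nat) (hp : p < a) :
    pvRow keys (fun j' => if j' = ((a - 1 - p : Nat) : Int)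
        then ((pvBit g p : Nat) : Int) else pvBitF a g j')
      = pvRow keys (pvBitF a g) := by
  rw [pvRow_eq_iff]
  intro k hk
  by_cases hkj : k = a - 1 - p
  · subst hkj
    rw [if_pos rfl, pvBitF_eval a g _ (by omega), show a - 1 - (a - 1 - p) = p by omega]
  · rw [if_neg (by exact_mod_cast hkj)]

lemma pvRow_update_flip (keys : List String) (a g p : Nat) (hp : p < a) :
    pvRow keys (fun j' => if j' = ((a - 1 - p : Nat) : Int)
        then ((1 - pvBit g p : Nat) : Int) else pvBitF a g j')
      = pvRow keys (pvBitF a (g ^^^ 2 ^ p)) := by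
  rw [pvRow_eq_iff]
  intro k hk
  by_cases hkj : k = a - 1 - p
  · subst hkj
    rw [if_pos rfl, pvBitF_eval a _ _ (by omega), show a - 1 - (a - 1 - p) = p by omega,
      pvBit_xor_pow_self]
  · rw [if_neg (by exact_mod_cast hkj)]
    by_cases hka : k < a
    · rw [pvBitF_eval a g k hka, pvBitF_eval a _ k hka,
        pvBit_xor_pow_ne g p (a - 1 - k) (by omega)]
    · rw [pvBitF_eval_ge a g k (by omega), pvBitF_eval_ge a _ k (by omega)]

-- ---- dict equality / membership plumbing ----

lemma pvDict_beq_iff (d d' : PySem.Dict String Int) : (d == d') = true ↔ d = d' := by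
  cases d with | mk l1 => cases d' with | mk l2 =>
  have h : (PySem.Dict.mk l1 == PySem.Dict.mk l2) = (l1 == l2) := rfl
  rw [h]; simp

lemma pvContains_iff (l : List (PySem.Dict String Int)) (d : PySem.Dict String Int) :
    l.contains d = true ↔ d ∈ l := by
  induction l with
  | nil => simp
  | cons x xs ih => rw [List.contains_cons, Bool.or_eq_true, ih, pvDict_beq_iff]; simp

lemma pvUpdate_of_mem {l : List (PySem.Dict String Int)} {d : PySem.Dict String Int}
    (h : d ∈ l) : update_string l d = (l, false) := by
  unfold update_string
  rw [if_pos ((pvContains_iff l d).2 h)]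

lemma pvUpdate_of_not_mem {l : List (PySem.Dict String Int)} {d : PySem.Dict String Int}
    (h : ¬ d ∈ l) : update_string l d = (l ++ [d], true) := by
  unfold update_string
  rw [if_neg (fun hc => h ((pvContains_iff l d).1 hc))]

-- ---- the inner greedy loop produces exactly the next Gray row ----

lemma pvRows_succ (a : Nat) (keys : List String) (n : Nat) :
    pvRows a keys (n + 1) = pvRows a keys n ++ [pvRowD a keys n] := by
  simp [pvRows, List.range_succ]

lemma pvRowD_mem (a : Nat) (keys : List String) {m n : Nat} (h : m < n) :
    pvRowD a keys m ∈ pvRows a keys n := by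
  exact List.mem_map_of_mem (List.mem_range.2 h)

lemma pvInner_main (a : Nat) (keys : List String) (hnd : keys.Nodup) (hlen : a ≤ keys.length)
    (i t q : Nat) (hi : i + 1 < 2 ^ a) (hdec : i = 2 ^ (t + 1) * q + (2 ^ t - 1)) :
    ∀ p, p ≤ t →
    pvInnerA ((i : Int) + 1) (PySem.List.pyRange ((a : Int) - 1 - (p : Int)) (-1) (-1))
        (pvRows a keys (i + 1))
      = pvRows a keys (i + 2) := by
  have h2t := Nat.two_pow_pos t
  have h2t1 := Nat.two_pow_pos (t + 1)
  have ht : t < a := by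
    have h2ta : 2 ^ t < 2 ^ a := by omega
    exact (Nat.pow_lt_pow_iff_right (by norm_num)).1 h2ta
  have hgilt : pvGray i < 2 ^ a := pvGray_lt (by omega)
  -- one iteration of the inner loop, for any bit position p < a
  have step : ∀ p : Nat, p < a →
      (pvRowD a keys (i ^^^ (2 ^ (p + 1) - 1)) ∈ pvRows a keys (i + 1) →
        pvInnerA ((i : Int) + 1)
            (PySem.List.pyRange ((a : Int) - 1 - (p : Int)) (-1) (-1)) (pvRows a keys (i + 1))
          = pvInnerA ((i : Int) + 1)
              (PySem.List.pyRange ((a : Int) - 1 - ((p : Int) + 1)) (-1) (-1))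
              (pvRows a keys (i + 1))) ∧
      (pvRowD a keys (i ^^^ (2 ^ (p + 1) - 1)) ∉ pvRows a keys (i + 1) →
        pvInnerA ((i : Int) + 1)
            (PySem.List.pyRange ((a : Int) - 1 - (p : Int)) (-1) (-1)) (pvRows a keys (i + 1))
          = pvRows a keys (i + 1) ++ [pvRowD a keys (i ^^^ (2 ^ (p + 1) - 1))]) := by
    intro p hpa
    have hidx : a - 1 - p < keys.length := by omega
    have hflipg : pvGray i ^^^ 2 ^ p = pvGray (i ^^^ (2 ^ (p + 1) - 1)) := pvGray_flip i p
    rw [PySem.List.pyRange_neg_one_cons (show (-1 : Int) < (a : Int) - 1 - (p : Int) by omega)]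
    have hget : PySem.List.pyGet? (pvRows a keys (i + 1)) ((i : Int) + 1 - 1)
        = some (pvRowD a keys i) := by
      rw [show ((i : Int) + 1 - 1) = ((i : Nat) : Int) from by ring, PySem.List.pyGet?_natCast]
      simp [pvRows]
    have hgiu : get_index_to_update ((a : Int) - 1 - (p : Int)) (pvRowD a keys i)
        = some (keys[a - 1 - p]'hidx,
            PySem.Dict.mk (pvRow keys (fun j' =>
              if j' = ((a - 1 - p : Nat) : Int) then 0 else pvBitF a (pvGray i) j'))) := by
      unfold get_index_to_update
      rw [show (pvRowD a keys i).keys = keys from pvRow_keys keys _]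
      rw [show ((a : Int) - 1 - (p : Int)) = ((a - 1 - p : Nat) : Int) from by omega,
        PySem.List.pyGet?_natCast, List.getElem?_eq_getElem hidx]
      show some _ = some _
      rw [show (pvRowD a keys i) = PySem.Dict.mk (pvRow keys (pvBitF a (pvGray i))) from rfl,
        pvRow_insert keys hnd _ (a - 1 - p) hidx 0]
    rw [pvInnerA]
    simp only [hget, hgiu]
    have hble := pvBit_le_one (pvGray i) p
    -- the set-to-0 and set-to-1 candidates, as canonical rows
    have hself := pvRow_update_self keys a (pvGray i) p hpa
    have hflip := pvRow_update_flip keys a (pvGray i) p hpa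
    rcases (show pvBit (pvGray i) p = 0 ∨ pvBit (pvGray i) p = 1 by omega) with hb | hb
    · -- current bit 0: first candidate is the row itself (seen), second is the flip
      rw [hb] at hself hflip
      norm_num at hself hflip
      rw [hself]
      simp only [pvUpdate_of_mem (show PySem.Dict.mk (pvRow keys (pvBitF a (pvGray i)))
            ∈ pvRows a keys (i + 1) from pvRowD_mem a keys (by omega))]
      simp only [Bool.false_eq_true, if_false]
      rw [show (PySem.Dict.mk (pvRow keys (pvBitF a (pvGray i)))).insert
            (keys[a - 1 - p]'hidx) 1
          = PySem.Dict.mk (pvRow keys (fun j' =>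
              if j' = ((a - 1 - p : Nat) : Int) then 1 else pvBitF a (pvGray i) j'))
          from pvRow_insert keys hnd _ (a - 1 - p) hidx 1, hflip, hflipg]
      constructor <;> intro hmem
      · simp only [pvUpdate_of_mem (d := PySem.Dict.mk (pvRow keys
            (pvBitF a (pvGray (i ^^^ (2 ^ (p + 1) - 1)))))) hmem]
        simp only [Bool.false_eq_true, if_false]
        rw [show ((a : Int) - 1 - (p : Int) - 1) = ((a : Int) - 1 - ((p : Int) + 1)) from by
          ring]
      · simp only [pvUpdate_of_not_mem (d := PySem.Dict.mk (pvRow keys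
            (pvBitF a (pvGray (i ^^^ (2 ^ (p + 1) - 1)))))) hmem]
        rfl
    · -- current bit 1: the first candidate IS the flip
      rw [hb] at hself hflip
      norm_num at hself hflip
      rw [hflip, hflipg]
      constructor <;> intro hmem
      · simp only [pvUpdate_of_mem (d := PySem.Dict.mk (pvRow keys
            (pvBitF a (pvGray (i ^^^ (2 ^ (p + 1) - 1)))))) hmem]
        simp only [Bool.false_eq_true, if_false]
        -- second candidate: set the bit back to 1, i.e. the current row (seen)
        rw [show (PySem.Dict.mk (pvRow keys
              (pvBitF a (pvGray (i ^^^ (2 ^ (p + 1) - 1)))))).insert (keys[a - 1 - p]'hidx) 1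
            = PySem.Dict.mk (pvRow keys (fun j' =>
                if j' = ((a - 1 - p : Nat) : Int) then 1
                else pvBitF a (pvGray (i ^^^ (2 ^ (p + 1) - 1))) j'))
            from pvRow_insert keys hnd _ (a - 1 - p) hidx 1]
        have hback := pvRow_update_flip keys a (pvGray (i ^^^ (2 ^ (p + 1) - 1))) p hpa
        rw [show pvBit (pvGray (i ^^^ (2 ^ (p + 1) - 1))) p = 0 from by
            rw [← hflipg, pvBit_xor_pow_self, hb],
          show pvGray (i ^^^ (2 ^ (p + 1) - 1)) ^^^ 2 ^ p = pvGray i from by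
            rw [← hflipg, Nat.xor_assoc, Nat.xor_self, Nat.xor_zero]] at hback
        norm_num at hback
        rw [hback]
        simp only [pvUpdate_of_mem (show PySem.Dict.mk (pvRow keys (pvBitF a (pvGray i)))
              ∈ pvRows a keys (i + 1) from pvRowD_mem a keys (by omega))]
        simp only [Bool.false_eq_true, if_false]
        rw [show ((a : Int) - 1 - (p : Int) - 1) = ((a : Int) - 1 - ((p : Int) + 1)) from by
          ring]
      · simp only [pvUpdate_of_not_mem (d := PySem.Dict.mk (pvRow keys
            (pvBitF a (pvGray (i ^^^ (2 ^ (p + 1) - 1)))))) hmem]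
        rfl
  -- the flip at p < t is an already-seen row
  have hseen : ∀ p : Nat, p < t →
      pvRowD a keys (i ^^^ (2 ^ (p + 1) - 1)) ∈ pvRows a keys (i + 1) := by
    intro p hpt
    apply pvRowD_mem
    rw [pvXor_low hdec hpt]
    have hle : 2 ^ (p + 1) ≤ 2 ^ t := Nat.pow_le_pow_right (by norm_num) (by omega)
    have hpos := Nat.two_pow_pos (p + 1)
    have h2 := Nat.two_pow_pos (p + 1)
    omega
  -- the flip at p = t is the NEXT row, not yet present
  have hnext : i ^^^ (2 ^ (t + 1) - 1) = i + 1 := pvXor_top hdec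
  have hnew : ¬ pvRowD a keys (i ^^^ (2 ^ (t + 1) - 1)) ∈ pvRows a keys (i + 1) := by
    rw [hnext]
    intro hmem
    simp only [pvRows, List.mem_map, List.mem_range] at hmem
    obtain ⟨m, hm, heq⟩ := hmem
    have hit := congrArg PySem.Dict.items heq
    have := (pvRow_gray_inj a keys hlen _ _ (pvGray_lt (by omega)) (pvGray_lt hi)).1
      (show pvRow _ (pvBitF a (pvGray m)) = pvRow _ (pvBitF a (pvGray (i + 1))) from hit)
    have := pvGray_inj this
    omega
  -- downward induction from bit p up to the flip bit t
  suffices H : ∀ d p, p ≤ t → t - p = d →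
      pvInnerA ((i : Int) + 1) (PySem.List.pyRange ((a : Int) - 1 - (p : Int)) (-1) (-1))
          (pvRows a keys (i + 1))
        = pvRows a keys (i + 2) by
    exact fun p hp => H (t - p) p hp rfl
  intro d
  induction d with
  | zero =>
    intro p hp h0
    have hpt : p = t := by omega
    subst hpt
    rw [(step p (by omega)).2 hnew, hnext, ← pvRows_succ]
  | succ d ih =>
    intro p hp hd
    have hpt : p < t := by omega
    rw [(step p (by omega)).1 (hseen p hpt)]
    rw [show ((p : Int) + 1) = ((p + 1 : Nat) : Int) from by push_cast; ring]
    exact ih (p + 1) (by omega) (by omega)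

-- ---- outer loop ----

lemma pvOuter (a : Nat) (keys : List String) (hnd : keys.Nodup) (hlen : a ≤ keys.length) :
    ∀ n : Nat, 1 ≤ n → n ≤ 2 ^ a →
    (PySem.List.pyRange 1 (n : Int) 1).foldl
        (fun ans i => pvInnerA i (PySem.List.pyRange ((a : Int) - 1) (-1) (-1)) ans)
        (pvRows a keys 1)
      = pvRows a keys n := by
  intro n
  induction n with
  | zero => omega
  | succ n ih =>
    intro h1 hn
    rcases Nat.eq_zero_or_pos n with rfl | hn1
    · rw [show ((0 + 1 : Nat) : Int) = 1 from by norm_num,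
        PySem.List.pyRange_one_eq_nil (le_refl 1)]
      rfl
    · rw [show ((n + 1 : Nat) : Int) = (n : Int) + 1 from by push_cast; ring,
        PySem.List.pyRange_one_succ_right (show (1 : Int) ≤ (n : Int) by omega),
        List.foldl_append, ih (by omega) (by omega)]
      simp only [List.foldl_cons, List.foldl_nil]
      obtain ⟨q, hq⟩ := pvLowZero_decomp (n - 1)
      have hmain := pvInner_main a keys hnd hlen (n - 1) (pvLowZero (n - 1)) q
        (show (n - 1) + 1 < 2 ^ a by omega) hq 0 (Nat.zero_le _)
      rw [show (((n - 1 : Nat) : Int) + 1) = (n : Int) from by omega] at hmain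
      rw [show ((a : Int) - 1 - ((0 : Nat) : Int)) = (a : Int) - 1 from by norm_num] at hmain
      rw [show (n - 1) + 1 = n from by omega, show (n - 1) + 2 = n + 1 from by omega] at hmain
      exact hmain

-- ---- the initial dict ----

lemma pvInit_aux (val S : List String) :
    val.foldl (fun d i => d.insert i 0) (PySem.Dict.mk (S.map (fun k => (k, (0 : Int)))))
      = PySem.Dict.mk ((val.foldl PySem.Set.add S).map (fun k => (k, (0 : Int)))) := by
  induction val generalizing S with
  | nil => rfl
  | cons x xs ih =>
    simp only [List.foldl_cons]
    rw [show (PySem.Dict.mk (S.map (fun k => (k, (0 : Int))))).insert x 0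
        = PySem.Dict.mk ((PySem.Set.add S x).map (fun k => (k, (0 : Int)))) from ?_]
    · exact ih (PySem.Set.add S x)
    · have hkeys : (PySem.Dict.mk (S.map (fun k => (k, (0 : Int))))).keys = S := by
        show (S.map (fun k => (k, (0 : Int)))).map Prod.fst = S
        rw [List.map_map, show (Prod.fst ∘ fun k => (k, (0 : Int))) = id from rfl, List.map_id]
      by_cases hx : x ∈ S
      · have hc : (PySem.Dict.mk (S.map (fun k => (k, (0 : Int))))).contains x = true := by
          rw [PySem.Dict.contains_iff_mem_keys, hkeys]; exact hx
        apply PySem.Dict.ext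
        rw [PySem.Dict.items_insert_of_contains _ _ hc]
        rw [show (PySem.Dict.mk (S.map (fun k => (k, (0 : Int))))).items
            = S.map (fun k => (k, (0 : Int))) from rfl]
        rw [show PySem.Set.add S x = S from by simp [PySem.Set.add, PySem.Set.contains, hx]]
        rw [List.map_map]
        apply List.map_congr_left
        intro k hk
        simp only [Function.comp_apply]
        by_cases hkx : k = x
        · subst hkx; simp
        · simp [show (k == x) = false from by simpa using hkx]
      · have hc : (PySem.Dict.mk (S.map (fun k => (k, (0 : Int))))).contains x = false := by
          rw [← Bool.not_eq_true, PySem.Dict.contains_iff_mem_keys, hkeys]; exact hx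
        apply PySem.Dict.ext
        rw [PySem.Dict.items_insert_of_not_contains _ _ hc]
        rw [show PySem.Set.add S x = S ++ [x] from by
          simp [PySem.Set.add, PySem.Set.contains, hx]]
        simp

lemma pvInit (val : List String) :
    val.foldl (fun d i => d.insert i 0) PySem.Dict.empty
      = PySem.Dict.mk ((PySem.List.dedup val).map (fun k => (k, (0 : Int)))) := by
  have h := pvInit_aux val []
  simp only [List.map_nil] at h
  rw [show PySem.Dict.empty = (PySem.Dict.mk ([] : List (String × Int))) from rfl, h,
    PySem.List.dedup_eq_ofList, PySem.Set.ofList_eq_foldl]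

lemma pvRow_const_zero (keys : List String) (f : Int → Int)
    (hf : ∀ k : Nat, k < keys.length → f (k : Int) = 0) :
    pvRow keys f = keys.map (fun k => (k, (0 : Int))) := by
  apply List.ext_getElem (by rw [pvRow_length, List.length_map])
  intro k h1 h2
  have hk : k < keys.length := by rwa [pvRow_length] at h1
  rw [pvRow_getElem keys _ k hk, List.getElem_map, hf k hk]

lemma pvRow_zero (a : Nat) (keys : List String) :
    pvRow keys (pvBitF a (pvGray 0)) = keys.map (fun k => (k, (0 : Int))) := by
  apply pvRow_const_zero
  intro k hk
  simp [pvBitF, pvBit, pvGray]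

-- ---- the two ports against the canonical rows ----

lemma pvA_eq (a : Nat) (val : List String) (hlen : a ≤ (PySem.List.dedup val).length) :
    generate_binary_combinations (a : Int) val
      = (pvRows a (PySem.List.dedup val) (2 ^ a)).map PySem.Dict.items := by
  simp only [generate_binary_combinations]
  rw [if_pos (Int.natCast_nonneg a), Int.toNat_natCast]
  have hinit : initialize_string val = pvRows a (PySem.List.dedup val) 1 := by
    unfold initialize_string
    rw [pvInit val, show pvRows a (PySem.List.dedup val) 1 = [pvRowD a (PySem.List.dedup val) 0]
      from by simp [pvRows], pvRowD, pvRow_zero a (PySem.List.dedup val)]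
  rw [hinit]
  exact congrArg (List.map PySem.Dict.items) (pvOuter a (PySem.List.dedup val)
    (PySem.List.nodup_dedup val) hlen (2 ^ a) (Nat.one_le_two_pow) (le_refl _))

lemma pvBitVal (a c g : Nat) (hc : c < a) :
    PySem.Int.band (((g : Nat) : Int) >>> (((a : Int) - 1 - (c : Int)).toNat)) 1
      = ((pvBit g (a - 1 - c) : Nat) : Int) := by
  rw [show ((a : Int) - 1 - (c : Int)).toNat = a - 1 - c from by omega,
    ← Int.natCast_shiftRight, show (1 : Int) = ((1 : Nat) : Int) from rfl,
    PySem.Int.band_natCast]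
  rfl

lemma pvB_eq (a : Nat) (val : List String) (hlen : a ≤ (PySem.List.dedup val).length) :
    generate_binary_combinations_alt (a : Int) val
      = (pvRows a (PySem.List.dedup val) (2 ^ a)).map PySem.Dict.items := by
  simp only [generate_binary_combinations_alt]
  rw [if_pos (Int.natCast_nonneg a), Int.toNat_natCast]
  conv_lhs => rw [show PySem.List.pyRange 0 ((2 ^ a : Nat) : Int)
    = List.map (fun k => ((k : Nat) : Int)) (List.range (2 ^ a))
    from PySem.List.pyRange_zero_nat (2 ^ a)]
  rw [List.map_map, pvRows, List.map_map]
  apply List.map_congr_left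
  intro m hm
  have hma : m < 2 ^ a := List.mem_range.1 hm
  have hnd := PySem.List.nodup_dedup val
  simp only [Function.comp_apply]
  have hg : PySem.Int.bxor (m : Int) ((m : Int) >>> 1) = ((pvGray m : Nat) : Int) := by
    rw [show ((m : Int) >>> (1 : Int)) = ((m >>> 1 : Nat) : Int) from Int.mem_toNat?.mp rfl,
      PySem.Int.bxor_natCast]
    rfl
  rw [hg]
  have hrow0 : (PySem.List.dedup val).foldl (fun d k => d.insert k 0) PySem.Dict.empty
      = PySem.Dict.mk (pvRow (PySem.List.dedup val) (fun _ => (0 : Int))) := by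
    rw [pvInit (PySem.List.dedup val), PySem.List.dedup_eq_ofList,
      PySem.Set.ofList_eq_self_of_nodup _ hnd]
    exact congrArg PySem.Dict.mk
      (pvRow_const_zero (PySem.List.dedup val) _ (fun k hk => rfl)).symm
  rw [hrow0]
  have hfold : ∀ c : Nat, c ≤ a →
      (PySem.List.pyRange 0 ((c : Nat) : Int) 1).foldl (fun r j =>
          match PySem.List.pyGet? (PySem.List.dedup val) j with
          | none => r
          | some key => r.insert key
              (PySem.Int.band (((pvGray m : Nat) : Int) >>> (((a : Int) - 1 - j).toNat)) 1))
        (PySem.Dict.mk (pvRow (PySem.List.dedup val) (fun _ => (0 : Int))))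
        = PySem.Dict.mk (pvRow (PySem.List.dedup val) (fun j' =>
            if j' < (c : Int) then pvBitF a (pvGray m) j' else 0)) := by
    intro c
    induction c with
    | zero =>
      intro _
      rw [show (((0 : Nat) : Nat) : Int) = 0 from rfl, PySem.List.pyRange_one_eq_nil (le_refl 0)]
      exact congrArg PySem.Dict.mk ((pvRow_eq_iff _ _ _).2 (fun k hk => by simp))
    | succ c ih =>
      intro hca
      have hcl : c < (PySem.List.dedup val).length := by omega
      rw [show (((c + 1 : Nat) : Nat) : Int) = ((c : Nat) : Int) + 1 from by push_cast; ring,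
        PySem.List.pyRange_one_succ_right (by omega), List.foldl_append, ih (by omega)]
      simp only [List.foldl_cons, List.foldl_nil]
      have hpg : PySem.List.pyGet? (PySem.List.dedup val) ((c : Nat) : Int)
          = some ((PySem.List.dedup val)[c]'hcl) := by
        rw [PySem.List.pyGet?_natCast, List.getElem?_eq_getElem hcl]
      simp only [hpg]
      rw [pvRow_insert (PySem.List.dedup val) hnd _ c hcl _]
      refine congrArg PySem.Dict.mk ((pvRow_eq_iff _ _ _).2 (fun k hk => ?_))
      by_cases hkc : k = c
      · subst hkc
        rw [if_pos rfl, if_pos (show ((k : Nat) : Int) < ((k : Nat) : Int) + 1 from by omega),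
          pvBitVal a k (pvGray m) (by omega), pvBitF_eval a _ k (by omega)]
      · rw [if_neg (show ¬ ((k : Nat) : Int) = ((c : Nat) : Int) from by
          exact_mod_cast hkc)]
        by_cases hklt : k < c
        · rw [if_pos (show ((k : Nat) : Int) < ((c : Nat) : Int) from by exact_mod_cast hklt),
            if_pos (show ((k : Nat) : Int) < ((c : Nat) : Int) + 1 from by
              have : (k : Int) < (c : Int) := by exact_mod_cast hklt
              omega)]
        · rw [if_neg (show ¬ ((k : Nat) : Int) < ((c : Nat) : Int) from by
              exact_mod_cast hklt),
            if_neg (show ¬ ((k : Nat) : Int) < ((c : Nat) : Int) + 1 from by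
              have : ¬ (k : Int) < (c : Int) := by exact_mod_cast hklt
              omega)]
  rw [hfold a (le_refl a)]
  show pvRow (PySem.List.dedup val)
      (fun j' => if j' < ((a : Nat) : Int) then pvBitF a (pvGray m) j' else 0)
    = pvRow (PySem.List.dedup val) (pvBitF a (pvGray m))
  apply (pvRow_eq_iff _ _ _).2
  intro k hk
  by_cases hka : k < a
  · rw [if_pos (show ((k : Nat) : Int) < ((a : Nat) : Int) from by exact_mod_cast hka)]
  · rw [if_neg (show ¬ ((k : Nat) : Int) < ((a : Nat) : Int) from by exact_mod_cast hka),
      pvBitF_eval_ge a _ k (by omega)]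

-- ===== VERDICT (by name: the statement is the Claim_ definition above) =====
theorem generate_binary_combinations_spec : Claim_equal_generate_binary_combinations := by
  intro args val _ hpre
  obtain ⟨h0, hlen⟩ := hpre
  have hargs : args = ((args.toNat : Nat) : Int) := (Int.toNat_of_nonneg h0).symm
  rw [Spec_generate_binary_combinations, hargs]
  rw [pvA_eq args.toNat val (by omega), pvB_eq args.toNat val (by omega)]
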